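-- pv_equiv track=rewrite | github.com/JiapengWu/TeMP | utils/dataset.py | get_per_entity_time_sequence
-- ===== SOURCE A (Python) =====
-- from collections import defaultdict
--
-- def get_per_entity_time_sequence(time2triples):
--     interaction_time_sequence = defaultdict(set)
--     for tim, triple_dict in time2triples.items():
--         for h, r, t in triple_dict['train']:
--             interaction_time_sequence[h].add(tim)
--             interaction_time_sequence[t].add(tim)
--
--     for k in interaction_time_sequence.keys():
--         interaction_time_sequence[k] = sorted(list(interaction_time_sequence[k]))
--
--     # import pdb; pdb.set_trace()
--     return interaction_time_sequence
-- ===== SOURCE B (Python) =====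
-- def get_per_entity_time_sequence(time2triples):
--     seq = {}
--     # register every entity once, in first-appearance order, with an empty list
--     for triple_dict in time2triples.values():
--         for h, r, t in triple_dict['train']:
--             seq.setdefault(h, [])
--             seq.setdefault(t, [])
--     # sweep the times in sorted order; each entity's list is appended to in
--     # increasing time order, skipping a time already at the end of the list,
--     # so the lists come out sorted and deduplicated without any per-entity sort
--     for tim in sorted(time2triples):
--         for h, r, t in time2triples[tim]['train']:
--             for e in (h, t):
--                 lst = seq[e]
--                 if not lst or lst[-1] != tim:
--                     lst.append(tim)
--     return seq
-- ===== Notes on version B (the rewrite author's own statement) =====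
-- stated objective: alternative
-- what changed: Instead of accumulating a set of times per entity and sorting each set at the end, B registers the entities once in a plain dict and then sweeps the times in globally sorted order, appending a time to an entity's list only when it is not already the last element, so every per-entity list comes out sorted and deduplicated with one global sort and no sets or per-entity sorting; Pre_ excludes assoc lists with duplicate keys (a Python dict cannot carry them) and inner dicts lacking a 'train' key (A raises KeyError).
import Mathlib
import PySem

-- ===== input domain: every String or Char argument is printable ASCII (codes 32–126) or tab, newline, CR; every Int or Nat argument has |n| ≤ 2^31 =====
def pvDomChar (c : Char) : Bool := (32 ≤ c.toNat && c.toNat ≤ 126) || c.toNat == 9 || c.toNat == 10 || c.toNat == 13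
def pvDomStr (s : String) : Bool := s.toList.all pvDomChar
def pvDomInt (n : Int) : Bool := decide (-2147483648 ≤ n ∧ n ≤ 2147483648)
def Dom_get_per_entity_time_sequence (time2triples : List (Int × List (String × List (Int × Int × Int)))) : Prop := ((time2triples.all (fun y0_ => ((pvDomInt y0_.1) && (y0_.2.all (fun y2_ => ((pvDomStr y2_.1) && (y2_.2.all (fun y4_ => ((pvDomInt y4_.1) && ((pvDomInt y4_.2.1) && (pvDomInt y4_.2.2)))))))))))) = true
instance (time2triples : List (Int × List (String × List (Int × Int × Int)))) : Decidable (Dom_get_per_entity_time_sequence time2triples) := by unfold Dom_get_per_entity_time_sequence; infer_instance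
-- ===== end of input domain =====

-- B replaces A's per-entity set-then-sort by one sorted sweep over the times into a plain
-- dict (entities registered first, in first-appearance order); an alternative decomposition,
-- not claimed faster. Equivalence is about the return VALUE (A returns a defaultdict, B a dict).


-- ===== PORT A =====
-- triple_dict['train'] : first-match lookup; Python raises KeyError when 'train' is absent —
-- those inputs are excluded by Pre_ below, so the getD default is never reached there.
def pvTrainOf (td : List (String × List (Int × Int × Int))) : List (Int × Int × Int) :=
  (PySem.Dict.mk td).getD "train" []

-- interaction_time_sequence[h].add(tim); interaction_time_sequence[t].add(tim)
def pvAStep (tim : Int) (d : PySem.Dict Int (PySem.Set Int)) (tr : Int × Int × Int) :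
    PySem.Dict Int (PySem.Set Int) :=
  (d.modify tr.1 [] (fun s => PySem.Set.add s tim)).modify tr.2.2 [] (fun s => PySem.Set.add s tim)

def get_per_entity_time_sequence (time2triples : List (Int × List (String × List (Int × Int × Int)))) : List (Int × List Int) :=
  -- for tim, triple_dict in time2triples.items(): for h, r, t in triple_dict['train']: add both
  let d : PySem.Dict Int (PySem.Set Int) :=
    time2triples.foldl (fun d p => (pvTrainOf p.2).foldl (pvAStep p.1) d) PySem.Dict.empty
  -- for k in keys: interaction_time_sequence[k] = sorted(list(interaction_time_sequence[k]))
  let d2 : PySem.Dict Int (List Int) :=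
    d.keys.foldl (fun dd k => dd.insert k (PySem.List.sorted (dd.getD k []) (fun x => x) false)) d
  d2.items

-- ===== PORT B =====
-- registration body: seq.setdefault(h, []); seq.setdefault(t, [])
def pvBReg (d : PySem.Dict Int (List Int)) (tr : Int × Int × Int) : PySem.Dict Int (List Int) :=
  [tr.1, tr.2.2].foldl (fun d e => if d.contains e then d else d.insert e []) d

-- sweep body: for e in (h, t): lst = seq[e]; if not lst or lst[-1] != tim: lst.append(tim)
def pvBApp (tim : Int) (d : PySem.Dict Int (List Int)) (tr : Int × Int × Int) : PySem.Dict Int (List Int) :=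
  [tr.1, tr.2.2].foldl
    (fun d e =>
      let lst := d.getD e []
      if lst = [] ∨ PySem.List.pyGetD lst (-1) 0 ≠ tim then d.modify e [] (fun l => l ++ [tim]) else d)
    d

def get_per_entity_time_sequence_alt (time2triples : List (Int × List (String × List (Int × Int × Int)))) : List (Int × List Int) :=
  let seq0 : PySem.Dict Int (List Int) :=
    time2triples.foldl (fun d p => (pvTrainOf p.2).foldl pvBReg d) PySem.Dict.empty
  let seq : PySem.Dict Int (List Int) :=
    (PySem.List.sorted (time2triples.map Prod.fst) (fun x => x) false).foldl
      (fun d tim => (pvTrainOf ((PySem.Dict.mk time2triples).getD tim [])).foldl (pvBApp tim) d)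
      seq0
  seq.items

-- ===== PRECONDITION & SPEC =====
-- Pre_ excludes (a) association lists with a duplicate key in the outer or an inner dict — a
-- Python dict cannot carry duplicates, so such lists are artifacts of the dict→assoc-list
-- convention — and (b) inner dicts without a 'train' key, on which A raises KeyError.
def Pre_get_per_entity_time_sequence (time2triples : List (Int × List (String × List (Int × Int × Int)))) : Prop :=
  (time2triples.map Prod.fst).Nodup ∧
    ∀ p ∈ time2triples, "train" ∈ p.2.map Prod.fst ∧ (p.2.map Prod.fst).Nodup
instance (time2triples : List (Int × List (String × List (Int × Int × Int)))) : Decidable (Pre_get_per_entity_time_sequence time2triples) := by unfold Pre_get_per_entity_time_sequence; infer_instance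

def pvWitness_get_per_entity_time_sequence : (List (Int × List (String × List (Int × Int × Int)))) :=
  [(3, [("train", [(1, 0, 2), (2, 0, 1)])]), (1, [("train", [(1, 0, 4)]), ("valid", [])])]

def Spec_get_per_entity_time_sequence (time2triples : List (Int × List (String × List (Int × Int × Int)))) (out : List (Int × List Int)) : Prop := out = get_per_entity_time_sequence_alt time2triples
instance (time2triples : List (Int × List (String × List (Int × Int × Int)))) (out : List (Int × List Int)) : Decidable (Spec_get_per_entity_time_sequence time2triples out) := by unfold Spec_get_per_entity_time_sequence; infer_instance

-- ===== CLAIM (what is proved, stated in full; the proofs are below) =====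
def Claim_equal_get_per_entity_time_sequence : Prop := ∀ (time2triples : List (Int × List (String × List (Int × Int × Int)))), Dom_get_per_entity_time_sequence time2triples → Pre_get_per_entity_time_sequence time2triples → Spec_get_per_entity_time_sequence time2triples (get_per_entity_time_sequence time2triples)

-- ===== LEMMAS AND PROOFS =====

-- the (entity, time) occurrence stream both programs traverse, and its per-time slice
def pvEntsOf (td : List (String × List (Int × Int × Int))) : List Int :=
  (pvTrainOf td).flatMap (fun tr => [tr.1, tr.2.2])

def pvOcc (t2t : List (Int × List (String × List (Int × Int × Int)))) : List (Int × Int) :=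
  t2t.flatMap (fun p => (pvTrainOf p.2).flatMap (fun tr => [(tr.1, p.1), (tr.2.2, p.1)]))

def pvEntsAt (t2t : List (Int × List (String × List (Int × Int × Int)))) (tim : Int) : List Int :=
  pvEntsOf ((PySem.Dict.mk t2t).getD tim [])

-- flattened single-pair steps of the three loops
def pvMStep (d : PySem.Dict Int (PySem.Set Int)) (q : Int × Int) : PySem.Dict Int (PySem.Set Int) :=
  d.modify q.1 [] (fun s => PySem.Set.add s q.2)

def pvRStep (d : PySem.Dict Int (List Int)) (q : Int × Int) : PySem.Dict Int (List Int) :=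
  if d.contains q.1 then d else d.insert q.1 []

def pvBStep (tim : Int) (d : PySem.Dict Int (List Int)) (e : Int) : PySem.Dict Int (List Int) :=
  if d.getD e [] = [] ∨ PySem.List.pyGetD (d.getD e []) (-1) 0 ≠ tim then
    d.modify e [] (fun l => l ++ [tim])
  else d

-- A's building loop is the fold of pvMStep over the occurrence stream
theorem pvFlatA_inner (tim : Int) (l : List (Int × Int × Int)) (d : PySem.Dict Int (PySem.Set Int)) :
    l.foldl (pvAStep tim) d = (l.flatMap (fun tr => [(tr.1, tim), (tr.2.2, tim)])).foldl pvMStep d := by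
  induction l generalizing d with
  | nil => rfl
  | cons tr l ih => rw [List.foldl_cons, List.flatMap_cons, List.foldl_append, ih]; rfl

theorem pvFlatA (t2t : List (Int × List (String × List (Int × Int × Int))))
    (d0 : PySem.Dict Int (PySem.Set Int)) :
    t2t.foldl (fun d p => (pvTrainOf p.2).foldl (pvAStep p.1) d) d0
      = (pvOcc t2t).foldl pvMStep d0 := by
  induction t2t generalizing d0 with
  | nil => rfl
  | cons p t ih =>
    rw [List.foldl_cons, ih]
    simp only [pvOcc, List.flatMap_cons, List.foldl_append, pvFlatA_inner]

theorem pvFlatB1_inner (tim : Int) (l : List (Int × Int × Int)) (d : PySem.Dict Int (List Int)) :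
    l.foldl pvBReg d = (l.flatMap (fun tr => [(tr.1, tim), (tr.2.2, tim)])).foldl pvRStep d := by
  induction l generalizing d with
  | nil => rfl
  | cons tr l ih => rw [List.foldl_cons, List.flatMap_cons, List.foldl_append, ih]; rfl

theorem pvFlatB1 (t2t : List (Int × List (String × List (Int × Int × Int))))
    (d0 : PySem.Dict Int (List Int)) :
    t2t.foldl (fun d p => (pvTrainOf p.2).foldl pvBReg d) d0
      = (pvOcc t2t).foldl pvRStep d0 := by
  induction t2t generalizing d0 with
  | nil => rfl
  | cons p t ih =>
    rw [List.foldl_cons, ih]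
    simp only [pvOcc, List.flatMap_cons, List.foldl_append, pvFlatB1_inner p.1]

theorem pvFlatB2 (td : List (String × List (Int × Int × Int))) (tim : Int)
    (d0 : PySem.Dict Int (List Int)) :
    (pvTrainOf td).foldl (pvBApp tim) d0 = (pvEntsOf td).foldl (pvBStep tim) d0 := by
  rw [pvEntsOf]
  induction (pvTrainOf td) generalizing d0 with
  | nil => rfl
  | cons tr l ih => rw [List.foldl_cons, List.flatMap_cons, List.foldl_append, ih]; rfl

-- value of A's building fold at a key
theorem pvA_getD (l : List (Int × Int)) (d : PySem.Dict Int (PySem.Set Int)) (k : Int) :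
    (l.foldl pvMStep d).getD k []
      = PySem.Set.update (d.getD k []) ((l.filter (fun q => q.1 == k)).map Prod.snd) := by
  induction l generalizing d with
  | nil => simp [PySem.Set.update]
  | cons q l ih =>
    simp only [List.foldl_cons, ih, List.filter_cons]
    by_cases h : q.1 = k
    · simp [pvMStep, h, PySem.Set.update_cons]
    · simp [pvMStep, PySem.Dict.getD_modify, h, Ne.symm h]

-- a fold of inserts leaves a key it never touches alone
theorem pvGetD_foldl_insert_not_mem (g : PySem.Dict Int (List Int) → Int → List Int)
    (ks : List Int) (d : PySem.Dict Int (List Int)) (k : Int) (v : List Int) (hk : k ∉ ks) :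
    (ks.foldl (fun dd kk => dd.insert kk (g dd kk)) d).getD k v = d.getD k v := by
  induction ks generalizing d with
  | nil => rfl
  | cons a ks ih =>
    simp only [List.mem_cons, not_or] at hk
    simp [List.foldl_cons, ih _ hk.2, PySem.Dict.getD_insert, hk.1]

-- value of A's rewrite loop at a key it does touch
theorem pvA2_getD (ks : List Int) (d : PySem.Dict Int (List Int)) (k : Int)
    (hnd : ks.Nodup) (hk : k ∈ ks) :
    (ks.foldl (fun dd kk => dd.insert kk (PySem.List.sorted (dd.getD kk []) (fun x => x) false)) d).getD k []
      = PySem.List.sorted (d.getD k []) (fun x => x) false := by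
  induction ks generalizing d with
  | nil => cases hk
  | cons a ks ih =>
    rcases List.nodup_cons.mp hnd with ⟨ha, hnd'⟩
    rcases List.mem_cons.mp hk with h | h
    · subst h
      rw [List.foldl_cons, pvGetD_foldl_insert_not_mem _ _ _ _ _ ha,
        PySem.Dict.getD_insert]
      simp
    · rw [List.foldl_cons, ih _ hnd' h, PySem.Dict.getD_insert]
      have : k ≠ a := fun he => ha (he ▸ h)
      simp [this]

-- keys of B's registration fold
theorem pvB1_keys (l : List (Int × Int)) (d : PySem.Dict Int (List Int)) :
    (l.foldl pvRStep d).keys = PySem.Set.update d.keys (l.map Prod.fst) := by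
  induction l generalizing d with
  | nil => simp [PySem.Set.update]
  | cons q l ih =>
    rw [List.foldl_cons, List.map_cons, PySem.Set.update_cons, ih]
    congr 1
    by_cases h : d.contains q.1
    · have : q.1 ∈ d.keys := by
        have := PySem.Dict.contains_eq_decide_mem_keys d q.1
        rw [h] at this; exact of_decide_eq_true this.symm
      simp [pvRStep, h, PySem.Set.add, this]
    · rw [pvRStep, if_neg h, PySem.Dict.keys_insert_of_not_contains _ _ (by simpa using h)]
      have : q.1 ∉ d.keys := by
        have := PySem.Dict.contains_eq_decide_mem_keys d q.1
        rw [eq_false_of_ne_true h] at this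
        exact of_decide_eq_false this.symm
      simp [PySem.Set.add, this]

-- values of B's registration fold are all []
theorem pvB1_getD (l : List (Int × Int)) (d : PySem.Dict Int (List Int)) (k : Int)
    (h : d.getD k [] = []) : (l.foldl pvRStep d).getD k [] = [] := by
  induction l generalizing d with
  | nil => exact h
  | cons q l ih =>
    rw [List.foldl_cons]
    refine ih _ ?_
    by_cases hc : d.contains q.1
    · simpa [pvRStep, hc] using h
    · rw [pvRStep, if_neg hc, PySem.Dict.getD_insert]
      split_ifs <;> simp [h]

-- first-match lookup in an assoc list with pairwise-distinct keys hits the listed pair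
theorem pvMk_getD_of_mem {β : Type} (l : List (Int × β)) (a : Int) (b : β) (v : β)
    (hnd : (l.map Prod.fst).Nodup) (hp : (a, b) ∈ l) :
    (PySem.Dict.mk l).getD a v = b := by
  induction l with
  | nil => cases hp
  | cons q l ih =>
    obtain ⟨qa, qb⟩ := q
    rw [List.map_cons, List.nodup_cons] at hnd
    rcases List.mem_cons.mp hp with h | h
    · cases h
      simp [PySem.Dict.getD_eq_get?_getD, PySem.Dict.get?_mk_cons]
    · have hne : qa ≠ a := fun he => hnd.1 (he ▸ (List.mem_map_of_mem h : a ∈ l.map Prod.fst))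
      have := ih hnd.2 h
      rw [PySem.Dict.getD_eq_get?_getD, PySem.Dict.get?_mk_cons] at ⊢
      rw [PySem.Dict.getD_eq_get?_getD] at this
      simpa [hne] using this

-- membership in the occurrence stream
theorem pvMem_occ (t2t : List (Int × List (String × List (Int × Int × Int)))) (k x : Int) :
    (k, x) ∈ pvOcc t2t ↔ ∃ p ∈ t2t, p.1 = x ∧ k ∈ pvEntsOf p.2 := by
  simp only [pvOcc, pvEntsOf, List.mem_flatMap, List.mem_cons, List.not_mem_nil, or_false,
    Prod.mk.injEq]
  constructor
  · rintro ⟨p, hp, tr, htr, h | h⟩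
    · exact ⟨p, hp, h.2.symm, ⟨tr, htr, by simp [h.1]⟩⟩
    · exact ⟨p, hp, h.2.symm, ⟨tr, htr, by simp [h.1]⟩⟩
  · rintro ⟨p, hp, hx, tr, htr, h | h⟩
    · exact ⟨p, hp, tr, htr, Or.inl ⟨h, hx.symm⟩⟩
    · exact ⟨p, hp, tr, htr, Or.inr ⟨h, hx.symm⟩⟩

-- one sweep step never changes a list whose last element is already tim
theorem pvIn2 (es : List Int) (tim : Int) (d : PySem.Dict Int (List Int)) (k : Int)
    (h : (d.getD k []).getLast? = some tim) :
    (es.foldl (pvBStep tim) d).getD k [] = d.getD k [] := by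
  induction es generalizing d with
  | nil => rfl
  | cons e es ih =>
    rw [List.foldl_cons]
    by_cases he : e = k
    · subst he
      have hne : d.getD e [] ≠ [] := fun h0 => by simp [h0] at h
      have hlast : PySem.List.pyGetD (d.getD e []) (-1) 0 = tim := by
        rw [PySem.List.pyGetD_neg_one _ _ hne]
        rw [List.getLast?_eq_some_getLast hne] at h
        exact Option.some.inj h
      rw [pvBStep, if_neg (by simp [hne, hlast])]
      exact ih _ h
    · have hg : (d.modify e [] (fun l => l ++ [tim])).getD k [] = d.getD k [] := by
        rw [PySem.Dict.getD_modify]; simp [Ne.symm he]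
      rw [pvBStep]
      split_ifs with hc
      · rw [ih _ (by rw [hg]; exact h), hg]
      · exact ih _ h

-- one sweep step appends tim exactly once to each entity occurring at tim
theorem pvIn1 (es : List Int) (tim : Int) (d : PySem.Dict Int (List Int)) (k : Int)
    (h : (d.getD k []).getLast? ≠ some tim) :
    (es.foldl (pvBStep tim) d).getD k []
      = if k ∈ es then d.getD k [] ++ [tim] else d.getD k [] := by
  induction es generalizing d with
  | nil => simp
  | cons e es ih =>
    rw [List.foldl_cons]
    by_cases he : e = k
    · subst he
      have hcond : d.getD e [] = [] ∨ PySem.List.pyGetD (d.getD e []) (-1) 0 ≠ tim := by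
        by_cases h0 : d.getD e [] = []
        · exact Or.inl h0
        · refine Or.inr fun hl => h ?_
          rw [PySem.List.pyGetD_neg_one _ _ h0] at hl
          rw [List.getLast?_eq_some_getLast h0, hl]
      rw [pvBStep, if_pos hcond, if_pos (List.mem_cons_self ..)]
      have hm : (d.modify e [] (fun l => l ++ [tim])).getD e [] = d.getD e [] ++ [tim] := by
        rw [PySem.Dict.getD_modify]; simp
      rw [pvIn2 es tim _ e (by rw [hm]; simp), hm]
    · have hke : k ≠ e := fun hh => he hh.symm
      have hg : (d.modify e [] (fun l => l ++ [tim])).getD k [] = d.getD k [] := by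
        rw [PySem.Dict.getD_modify]; simp [Ne.symm he]
      have hmm : (k ∈ es) ↔ (k ∈ e :: es) := by simp [hke]
      by_cases hc : d.getD e [] = [] ∨ PySem.List.pyGetD (d.getD e []) (-1) 0 ≠ tim
      · rw [pvBStep, if_pos hc, ih (d.modify e [] (fun l => l ++ [tim])) (by rw [hg]; exact h), hg]
        exact if_congr hmm rfl rfl
      · rw [pvBStep, if_neg hc, ih d h]
        exact if_congr hmm rfl rfl

-- the whole sorted sweep: each entity's list collects, in order, the times at which it occurs
theorem pvSweep (t2t : List (Int × List (String × List (Int × Int × Int))))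
    (ts : List Int) (d : PySem.Dict Int (List Int)) (k : Int)
    (hts : ts.Pairwise (· < ·))
    (hbelow : ∀ x ∈ d.getD k [], ∀ t' ∈ ts, x < t') :
    (ts.foldl (fun d tim => (pvEntsAt t2t tim).foldl (pvBStep tim) d) d).getD k []
      = d.getD k [] ++ ts.filter (fun tim => decide (k ∈ pvEntsAt t2t tim)) := by
  induction ts generalizing d with
  | nil => simp
  | cons tim ts ih =>
    rcases List.pairwise_cons.mp hts with ⟨hlt, hts'⟩
    rw [List.foldl_cons]
    have hlast : (d.getD k []).getLast? ≠ some tim := by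
      intro hsome
      exact lt_irrefl _ (hbelow tim (List.mem_of_getLast? hsome) tim (List.mem_cons_self ..))
    have h1 := pvIn1 (pvEntsAt t2t tim) tim d k hlast
    rw [ih _ hts' ?below]
    case below =>
      intro x hx t' ht'
      rw [h1] at hx
      split_ifs at hx with hm
      · rcases List.mem_append.mp hx with hx | hx
        · exact hbelow x hx t' (List.mem_cons_of_mem _ ht')
        · simp only [List.mem_singleton] at hx
          exact hx ▸ hlt t' ht'
      · exact hbelow x hx t' (List.mem_cons_of_mem _ ht')
    rw [h1, List.filter_cons]
    by_cases hm : k ∈ pvEntsAt t2t tim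
    · simp [hm, List.append_assoc]
    · simp [hm]

-- keys are preserved by the sweep (every touched entity is already a key)
theorem pvBStep_keys (tim : Int) (d : PySem.Dict Int (List Int)) (e : Int)
    (he : e ∈ d.keys) : (pvBStep tim d e).keys = d.keys := by
  rw [pvBStep]
  split_ifs with hc
  · rw [PySem.Dict.keys_modify]
    have : d.contains e = true := by
      rw [PySem.Dict.contains_eq_decide_mem_keys]; exact decide_eq_true he
    rw [PySem.Dict.keys_insert_of_contains _ _ this]
  · rfl

theorem pvFold_bstep_keys (tim : Int) (es : List Int) (d : PySem.Dict Int (List Int))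
    (hes : ∀ e ∈ es, e ∈ d.keys) : (es.foldl (pvBStep tim) d).keys = d.keys := by
  induction es generalizing d with
  | nil => rfl
  | cons e es ih =>
    rw [List.foldl_cons]
    have hk := pvBStep_keys tim d e (hes e (List.mem_cons_self ..))
    rw [ih _ (fun e' he' => hk ▸ hes e' (List.mem_cons_of_mem _ he')), hk]

theorem pvSweep_keys (t2t : List (Int × List (String × List (Int × Int × Int))))
    (ts : List Int) (d : PySem.Dict Int (List Int))
    (h : ∀ tim ∈ ts, ∀ e ∈ pvEntsAt t2t tim, e ∈ d.keys) :
    (ts.foldl (fun d tim => (pvEntsAt t2t tim).foldl (pvBStep tim) d) d).keys = d.keys := by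
  induction ts generalizing d with
  | nil => rfl
  | cons tim ts ih =>
    rw [List.foldl_cons]
    have hk := pvFold_bstep_keys tim (pvEntsAt t2t tim) d (h tim (List.mem_cons_self ..))
    rw [ih _ (fun t' ht' e he => hk ▸ h t' (List.mem_cons_of_mem _ ht') e he), hk]

-- updating a set with elements it already has changes nothing
theorem pvUpdate_subset (s : PySem.Set Int) (xs : List Int) (h : ∀ x ∈ xs, x ∈ s) :
    PySem.Set.update s xs = s := by
  rw [PySem.Set.update_eq_append_filter]
  have : List.filter (fun y => !s.contains y) (PySem.Set.ofList xs) = [] := by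
    rw [List.filter_eq_nil_iff]
    intro y hy
    have : y ∈ s := h y ((PySem.Set.mem_ofList xs y).mp hy)
    simp [this]
  rw [this, List.append_nil]

-- (k, x) is an occurrence iff x is a listed time at which entity k occurs (distinct outer keys)
theorem pvOcc_mem_iff (t2t : List (Int × List (String × List (Int × Int × Int)))) (k x : Int)
    (hn : (t2t.map Prod.fst).Nodup) :
    (k, x) ∈ pvOcc t2t ↔ x ∈ t2t.map Prod.fst ∧ k ∈ pvEntsAt t2t x := by
  rw [pvMem_occ]
  constructor
  · rintro ⟨⟨pa, pb⟩, hp, rfl, hk⟩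
    refine ⟨List.mem_map_of_mem hp, ?_⟩
    rw [pvEntsAt, pvMk_getD_of_mem t2t pa pb [] hn hp]
    exact hk
  · rintro ⟨hx, hk⟩
    rcases List.mem_map.mp hx with ⟨⟨pa, pb⟩, hp, rfl⟩
    refine ⟨(pa, pb), hp, rfl, ?_⟩
    rw [pvEntsAt, pvMk_getD_of_mem t2t pa pb [] hn hp] at hk
    exact hk

theorem pvTimesOf_mem (t2t : List (Int × List (String × List (Int × Int × Int)))) (k x : Int) :
    x ∈ ((pvOcc t2t).filter (fun q => q.1 == k)).map Prod.snd ↔ (k, x) ∈ pvOcc t2t := by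
  simp only [List.mem_map, List.mem_filter, beq_iff_eq]
  constructor
  · rintro ⟨⟨qa, qb⟩, ⟨hm, rfl⟩, rfl⟩
    exact hm
  · intro h
    exact ⟨(k, x), ⟨h, rfl⟩, rfl⟩

-- the per-entity value produced by A equals the one produced by B
theorem pvVal_eq (t2t : List (Int × List (String × List (Int × Int × Int)))) (k : Int)
    (hn : (t2t.map Prod.fst).Nodup) :
    PySem.List.sorted (PySem.Set.ofList (((pvOcc t2t).filter (fun q => q.1 == k)).map Prod.snd))
        (fun x => x) false
      = (PySem.List.sorted (t2t.map Prod.fst) (fun x => x) false).filter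
          (fun tim => decide (k ∈ pvEntsAt t2t tim)) := by
  have hts_pairwise : (PySem.List.sorted (t2t.map Prod.fst) (fun x => x) false).Pairwise (· < ·) := by
    rw [← PySem.Set.ofList_eq_self_of_nodup _ hn]
    exact PySem.List.sorted_ofList_pairwise_lt _
  have hts_nodup : (PySem.List.sorted (t2t.map Prod.fst) (fun x => x) false).Nodup :=
    (PySem.List.sorted_perm _ _ _).nodup_iff.mpr hn
  refine PySem.List.sorted_eq_of_perm_of_pairwise_lt _ _ _ ?_ (List.Pairwise.filter _ hts_pairwise)
  refine (List.perm_ext_iff_of_nodup (hts_nodup.filter _) (PySem.Set.nodup_ofList _)).mpr ?_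
  intro x
  rw [List.mem_filter, PySem.List.mem_sorted, PySem.Set.mem_ofList, pvTimesOf_mem,
    pvOcc_mem_iff t2t k x hn, decide_eq_true_iff]

-- ===== VERDICT (by name: the statement is the Claim_ definition above) =====
theorem get_per_entity_time_sequence_spec : Claim_equal_get_per_entity_time_sequence := by
  intro t2t _hdom hpre
  have hn : (t2t.map Prod.fst).Nodup := hpre.1
  unfold Spec_get_per_entity_time_sequence
  unfold get_per_entity_time_sequence get_per_entity_time_sequence_alt
  rw [pvFlatA, pvFlatB1]
  have hfun : (fun (d : PySem.Dict Int (List Int)) tim =>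
        (pvTrainOf ((PySem.Dict.mk t2t).getD tim [])).foldl (pvBApp tim) d)
      = (fun d tim => (pvEntsAt t2t tim).foldl (pvBStep tim) d) :=
    funext fun d => funext fun tim => pvFlatB2 _ tim d
  rw [hfun]
  -- keys of A's building fold
  have keysA : (List.foldl pvMStep PySem.Dict.empty (pvOcc t2t)).keys
      = PySem.Set.ofList ((pvOcc t2t).map Prod.fst) := by
    have h := PySem.Dict.keys_foldl_modify_key (ν := PySem.Set Int) (pvOcc t2t) Prod.fst []
      (fun _ q s => PySem.Set.add s q.2) PySem.Dict.empty
    rw [PySem.Dict.keys_empty, PySem.Set.update_nil_left] at h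
    exact h
  have nodupK : (PySem.Set.ofList ((pvOcc t2t).map Prod.fst)).Nodup := PySem.Set.nodup_ofList _
  -- keys of B's registration fold
  have keysB0 : (List.foldl pvRStep PySem.Dict.empty (pvOcc t2t)).keys
      = PySem.Set.ofList ((pvOcc t2t).map Prod.fst) := by
    rw [pvB1_keys, PySem.Dict.keys_empty, PySem.Set.update_nil_left]
  -- every entity touched by the sweep is already registered
  have htouched : ∀ tim ∈ PySem.List.sorted (t2t.map Prod.fst) (fun x => x) false,
      ∀ e ∈ pvEntsAt t2t tim, e ∈ (List.foldl pvRStep PySem.Dict.empty (pvOcc t2t)).keys := by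
    intro tim htim e he
    rw [keysB0, PySem.Set.mem_ofList]
    have : (e, tim) ∈ pvOcc t2t :=
      (pvOcc_mem_iff t2t e tim hn).mpr ⟨(PySem.List.mem_sorted _ _ _ _).mp htim, he⟩
    exact List.mem_map_of_mem this
  -- items of A's result
  have keysA2 : (List.foldl
      (fun dd k => dd.insert k (PySem.List.sorted (dd.getD k []) (fun x => x) false))
      (List.foldl pvMStep PySem.Dict.empty (pvOcc t2t))
      (List.foldl pvMStep PySem.Dict.empty (pvOcc t2t)).keys).keys
      = PySem.Set.ofList ((pvOcc t2t).map Prod.fst) := by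
    rw [PySem.Dict.keys_foldl_insert _ (fun dd k => PySem.List.sorted (dd.getD k []) (fun x => x) false),
      keysA, pvUpdate_subset _ _ (fun x hx => hx)]
  have itemsA : (List.foldl
      (fun dd k => dd.insert k (PySem.List.sorted (dd.getD k []) (fun x => x) false))
      (List.foldl pvMStep PySem.Dict.empty (pvOcc t2t))
      (List.foldl pvMStep PySem.Dict.empty (pvOcc t2t)).keys).items
      = (PySem.Set.ofList ((pvOcc t2t).map Prod.fst)).map (fun k => (k,
          PySem.List.sorted (PySem.Set.ofList (((pvOcc t2t).filter (fun q => q.1 == k)).map Prod.snd))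
            (fun x => x) false)) := by
    rw [PySem.Dict.items_eq_map_keys _ (by rw [keysA2]; exact nodupK) [], keysA2]
    refine List.map_congr_left (fun k hk => ?_)
    rw [keysA] at *
    rw [pvA2_getD _ _ _ nodupK hk, pvA_getD, PySem.Dict.getD_empty, PySem.Set.update_nil_left]
  -- items of B's result
  have itemsB : (List.foldl (fun d tim => (pvEntsAt t2t tim).foldl (pvBStep tim) d)
      (List.foldl pvRStep PySem.Dict.empty (pvOcc t2t))
      (PySem.List.sorted (t2t.map Prod.fst) (fun x => x) false)).items
      = (PySem.Set.ofList ((pvOcc t2t).map Prod.fst)).map (fun k => (k,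
          (PySem.List.sorted (t2t.map Prod.fst) (fun x => x) false).filter
            (fun tim => decide (k ∈ pvEntsAt t2t tim)))) := by
    have hkeys := pvSweep_keys t2t (PySem.List.sorted (t2t.map Prod.fst) (fun x => x) false)
      (List.foldl pvRStep PySem.Dict.empty (pvOcc t2t)) htouched
    rw [PySem.Dict.items_eq_map_keys _ (by rw [hkeys, keysB0]; exact nodupK) [], hkeys, keysB0]
    refine List.map_congr_left (fun k _hk => ?_)
    have hts_pairwise : (PySem.List.sorted (t2t.map Prod.fst) (fun x => x) false).Pairwise (· < ·) := by
      rw [← PySem.Set.ofList_eq_self_of_nodup _ hn]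
      exact PySem.List.sorted_ofList_pairwise_lt _
    have h0 : (List.foldl pvRStep PySem.Dict.empty (pvOcc t2t)).getD k [] = [] :=
      pvB1_getD _ _ _ (PySem.Dict.getD_empty _ _)
    rw [pvSweep t2t _ _ k hts_pairwise (by rw [h0]; intro x hx; cases hx), h0, List.nil_append]
  rw [itemsA, itemsB]
  exact List.map_congr_left (fun k _hk => by rw [pvVal_eq t2t k hn])
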